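-- pv_equiv track=rewrite | github.com/InsideZhou/inside-utils | python/turing/word_weight.py | word_weight
-- ===== SOURCE A (Python) =====
-- import string
--
-- def word_weight(s: str, n: int) -> int:
--     # write your solution here
--     str2int = ''.join([str(string.ascii_lowercase.index(c) + 1) for c in s])
--
--     result = 0
--     for _ in range(n):
--         result = 0
--         for c in str2int:
--             result += int(c)
--
--         str2int = str(result)
--
--     return result
-- ===== SOURCE B (Python) =====
-- import string
--
-- def word_weight(s: str, n: int) -> int:
--     if n <= 0:
--         return 0
--     total = 0
--     for c in s:
--         v = string.ascii_lowercase.index(c) + 1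
--         total += v // 10 + v % 10
--     for _ in range(n - 1):
--         if total < 10:
--             break
--         t = 0
--         while total:
--             total, d = divmod(total, 10)
--             t += d
--         total = t
--     return total
-- ===== Notes on version B (the rewrite author's own statement) =====
-- stated objective: faster
-- what changed: B replaces A's n full passes over a decimal string (rebuilt each round via str/int conversions) with one arithmetic pass summing per-letter digit contributions (v//10+v%10) and a digit-sum reduction via divmod that stops early at the single-digit fixed point.
import Mathlib
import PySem

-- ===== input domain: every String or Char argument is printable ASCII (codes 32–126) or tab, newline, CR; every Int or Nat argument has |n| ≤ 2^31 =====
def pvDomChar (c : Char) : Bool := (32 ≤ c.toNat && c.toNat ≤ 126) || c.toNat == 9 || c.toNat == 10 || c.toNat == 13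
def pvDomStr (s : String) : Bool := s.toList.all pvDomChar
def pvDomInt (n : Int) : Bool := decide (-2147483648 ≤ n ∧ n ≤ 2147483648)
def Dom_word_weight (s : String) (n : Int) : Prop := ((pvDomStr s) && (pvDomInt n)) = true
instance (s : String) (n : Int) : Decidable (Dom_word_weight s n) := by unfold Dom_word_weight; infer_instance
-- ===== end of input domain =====

-- B replaces A's n full passes over a decimal string (rebuilt by str/int each round) with one
-- arithmetic pass plus a divmod digit-sum loop that stops at the single-digit fixed point.

-- ===== PORT A =====
-- string.ascii_lowercase
def pvAlphabet : List Char :=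
  ['a','b','c','d','e','f','g','h','i','j','k','l','m',
   'n','o','p','q','r','s','t','u','v','w','x','y','z']

def word_weight (s : String) (n : Int) : Int :=
  -- str2int = ''.join([str(string.ascii_lowercase.index(c) + 1) for c in s])
  -- (.getD 0: Python raises ValueError when c is not a lowercase letter; Pre_ excludes those inputs)
  let str2int : List Char :=
    PySem.Chars.join [] (s.toList.map (fun c =>
      PySem.Int.toChars (((PySem.List.index? pvAlphabet c).getD 0 : Nat) + 1)))
  -- for _ in range(n): result = 0; for c in str2int: result += int(c); str2int = str(result)
  -- (.getD 0: int(c) never fails here, every char of str2int is a decimal digit)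
  let st := (PySem.List.pyRange 0 n 1).foldl
    (fun (st : Int × List Char) _ =>
      let result := st.2.foldl (fun r c => r + (PySem.Int.ofChars? [c]).getD 0) 0
      (result, PySem.Int.toChars result))
    (0, str2int)
  st.1

-- ===== PORT B =====
-- while total: total, d = divmod(total, 10); t += d
-- (hand port on Nat; exact here because total is a sum of nonnegative terms, so total ≥ 0,
--  and Python divmod on nonnegative ints is Nat division/remainder)
def pvDsGo (m : Nat) (t : Int) : Int :=
  if h : m = 0 then t else pvDsGo (m / 10) (t + ((m % 10 : Nat) : Int))
decreasing_by exact Nat.div_lt_self (Nat.pos_of_ne_zero h) (by norm_num)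

-- for _ in range(n - 1): if total < 10: break; … total = t
def pvReduce : Nat → Int → Int
  | 0, t => t
  | k+1, t => if t < 10 then t else pvReduce k (pvDsGo t.toNat 0)

def word_weight_alt (s : String) (n : Int) : Int :=
  if n ≤ 0 then 0
  else
    -- total += v // 10 + v % 10  with  v = string.ascii_lowercase.index(c) + 1
    let total := s.toList.foldl (fun acc c =>
      acc + PySem.Int.floordiv (((PySem.List.index? pvAlphabet c).getD 0 : Nat) + 1) 10
          + PySem.Int.mod (((PySem.List.index? pvAlphabet c).getD 0 : Nat) + 1) 10) 0
    pvReduce (n - 1).toNat total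

-- ===== PRECONDITION & SPEC =====
-- Pre_ excludes exactly the strings with a character outside 'a'..'z', on which
-- Python A raises ValueError at string.ascii_lowercase.index(c).
def Pre_word_weight (s : String) (n : Int) : Prop := s.toList.all (fun c => pvAlphabet.contains c) = true
instance (s : String) (n : Int) : Decidable (Pre_word_weight s n) := by
  unfold Pre_word_weight; infer_instance

def pvWitness_word_weight : String × Int := ("abc", 2)

def Spec_word_weight (s : String) (n : Int) (out : Int) : Prop := out = word_weight_alt s n
instance (s : String) (n : Int) (out : Int) : Decidable (Spec_word_weight s n out) := by
  unfold Spec_word_weight; infer_instance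

-- ===== CLAIM (what is proved, stated in full; the proofs are below) =====
def Claim_equal_word_weight : Prop :=
  ∀ (s : String) (n : Int), Dom_word_weight s n → Pre_word_weight s n →
    Spec_word_weight s n (word_weight s n)

-- ===== LEMMAS AND PROOFS =====

-- digit value of one char, as A's inner loop reads it
def pvG (c : Char) : Int := (PySem.Int.ofChars? [c]).getD 0
-- A's inner loop over a digit string
def pvDsum (cs : List Char) : Int := cs.foldl (fun r c => r + pvG c) 0
-- recursive decimal digit sum
def pvS (m : Nat) : Int :=
  if h : m = 0 then 0 else pvS (m / 10) + ((m % 10 : Nat) : Int)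
decreasing_by exact Nat.div_lt_self (Nat.pos_of_ne_zero h) (by norm_num)

theorem pvDsum_foldl (cs : List Char) (a : Int) :
    cs.foldl (fun r c => r + pvG c) a = a + pvDsum cs := by
  induction cs generalizing a with
  | nil => simp [pvDsum]
  | cons c cs ih =>
    simp only [pvDsum, List.foldl_cons]
    rw [ih, ih (0 + pvG c)]
    ring

theorem pvDsum_cons (c : Char) (cs : List Char) : pvDsum (c :: cs) = pvG c + pvDsum cs := by
  simp only [pvDsum, List.foldl_cons]
  rw [pvDsum_foldl]
  ring_nf
  rw [pvDsum]

theorem pvG_digitChar (d : Nat) (hd : d < 10) : pvG (Nat.digitChar d) = d := by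
  interval_cases d <;> decide

theorem pvDsum_toDigitsCore (f : Nat) :
    ∀ (m : Nat) (acc : List Char), m < f →
      pvDsum (Nat.toDigitsCore 10 f m acc) = pvS m + pvDsum acc := by
  induction f with
  | zero => intro m acc h; omega
  | succ f ih =>
    intro m acc h
    simp only [Nat.toDigitsCore]
    by_cases hd : m / 10 = 0
    · rw [if_pos hd, pvDsum_cons, pvG_digitChar _ (by omega)]
      have hm : pvS m = ((m % 10 : Nat) : Int) := by
        by_cases h0 : m = 0
        · subst h0; rw [pvS]; simp
        · rw [pvS, dif_neg h0, hd, pvS]; simp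
      rw [hm]
    · rw [if_neg hd]
      have hpos : 0 < m := by omega
      have hlt : m / 10 < f := by
        have := Nat.div_lt_self hpos (by norm_num : 1 < 10)
        omega
      have h0 : m ≠ 0 := by omega
      rw [ih (m / 10) _ hlt, pvDsum_cons, pvG_digitChar _ (by omega)]
      conv_rhs => rw [pvS]
      rw [dif_neg h0]
      ring

theorem pvDsum_toChars (r : Int) (hr : 0 ≤ r) :
    pvDsum (PySem.Int.toChars r) = pvS r.toNat := by
  rw [PySem.Int.toChars, if_neg (by omega), Nat.toDigits]
  rw [pvDsum_toDigitsCore (r.toNat + 1) r.toNat [] (by omega)]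
  simp [pvDsum]

theorem pvS_nonneg (m : Nat) : 0 ≤ pvS m := by
  induction m using Nat.strong_induction_on with
  | _ m ih =>
    rw [pvS]
    split
    · norm_num
    · rename_i h0
      have := ih (m / 10) (Nat.div_lt_self (by omega) (by norm_num))
      positivity

theorem pvS_small (m : Nat) (h : m < 10) : pvS m = m := by
  by_cases h0 : m = 0
  · subst h0; rw [pvS]; simp
  · rw [pvS, dif_neg h0, Nat.div_eq_of_lt h, pvS]
    simp
    omega

theorem pvS_two (m : Nat) (h : m < 100) : pvS m = (m / 10 : Nat) + ((m % 10 : Nat) : Int) := by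
  by_cases h0 : m = 0
  · subst h0; rw [pvS]; simp
  · rw [pvS, dif_neg h0, pvS_small (m / 10) (by omega)]

theorem pvDsGo_eq (m : Nat) (t : Int) : pvDsGo m t = t + pvS m := by
  induction m using Nat.strong_induction_on generalizing t with
  | _ m ih =>
    rw [pvDsGo, pvS]
    by_cases h0 : m = 0
    · rw [dif_pos h0, dif_pos h0]; ring
    · rw [dif_neg h0, dif_neg h0,
        ih (m / 10) (Nat.div_lt_self (by omega) (by norm_num))]
      ring

-- A's per-round step and its iteration
def pvStepA (st : Int × List Char) : Int × List Char :=
  (pvDsum st.2, PySem.Int.toChars (pvDsum st.2))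

theorem foldl_const_iterate {α β : Type} (l : List α) (f : β → β) (b : β) :
    l.foldl (fun s _ => f s) b = f^[l.length] b := by
  induction l generalizing b with
  | nil => rfl
  | cons x l ih =>
    simp only [List.foldl_cons, List.length_cons, ih, Function.iterate_succ_apply]

theorem pvStepA_iterate (k : Nat) (r : Int) (cs : List Char) :
    (pvStepA^[k+1] (r, cs)).1 =
      (fun t => pvDsum (PySem.Int.toChars t))^[k] (pvDsum cs) := by
  induction k generalizing r cs with
  | zero => simp [pvStepA]
  | succ k ih =>
    rw [Function.iterate_succ_apply]
    show (pvStepA^[k+1] (pvDsum cs, PySem.Int.toChars (pvDsum cs))).1 = _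
    rw [ih]
    exact (Function.iterate_succ_apply (fun t => pvDsum (PySem.Int.toChars t)) k (pvDsum cs)).symm

theorem pvIter_fixed (k : Nat) (t : Int) (h0 : 0 ≤ t) (h10 : t < 10) :
    (fun t => pvDsum (PySem.Int.toChars t))^[k] t = t := by
  induction k with
  | zero => rfl
  | succ k ih =>
    rw [Function.iterate_succ_apply]
    have hf : pvDsum (PySem.Int.toChars t) = t := by
      rw [pvDsum_toChars t h0, pvS_small t.toNat (by omega)]
      omega
    simpa [hf] using ih

theorem pvReduce_eq_iterate (k : Nat) (t : Int) (h0 : 0 ≤ t) :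
    pvReduce k t = (fun t => pvDsum (PySem.Int.toChars t))^[k] t := by
  induction k generalizing t with
  | zero => rfl
  | succ k ih =>
    rw [pvReduce, Function.iterate_succ_apply]
    by_cases h10 : t < 10
    · rw [if_pos h10]
      have hf : pvDsum (PySem.Int.toChars t) = t := by
        rw [pvDsum_toChars t h0, pvS_small t.toNat (by omega)]
        omega
      rw [hf, pvIter_fixed k t h0 h10]
    · rw [if_neg h10, pvDsGo_eq, ih _ (by have := pvS_nonneg t.toNat; omega)]
      rw [← pvDsum_toChars t h0]
      norm_num

theorem pvIdx_le (c : Char) : (PySem.List.index? pvAlphabet c).getD 0 ≤ 25 := by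
  cases h : PySem.List.index? pvAlphabet c with
  | none => simp
  | some k =>
    obtain ⟨hk, -, -⟩ := PySem.List.getElem_of_index?_eq_some h
    have : pvAlphabet.length = 26 := by decide
    simp only [Option.getD_some]
    omega

theorem pvChunk_eq (c : Char) :
    pvDsum (PySem.Int.toChars (((PySem.List.index? pvAlphabet c).getD 0 : Nat) + 1)) =
      PySem.Int.floordiv (((PySem.List.index? pvAlphabet c).getD 0 : Nat) + 1) 10
      + PySem.Int.mod (((PySem.List.index? pvAlphabet c).getD 0 : Nat) + 1) 10 := by
  have hk := pvIdx_le c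
  set k := (PySem.List.index? pvAlphabet c).getD 0 with hkdef
  have h1 : ((k : Int) + 1) = ((k + 1 : Nat) : Int) := by push_cast; ring
  rw [h1, pvDsum_toChars _ (by positivity), Int.toNat_natCast,
    pvS_two (k + 1) (by omega),
    (by norm_num : (10 : Int) = ((10 : Nat) : Int)),
    PySem.Int.floordiv_natCast, PySem.Int.mod_natCast]

theorem pvDsum_append (xs ys : List Char) :
    pvDsum (xs ++ ys) = pvDsum xs + pvDsum ys := by
  simp only [pvDsum, List.foldl_append]
  rw [pvDsum_foldl]
  rfl

theorem pvB_shift (l : List Char) (a : Int) :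
    l.foldl (fun acc c =>
      acc + PySem.Int.floordiv (((PySem.List.index? pvAlphabet c).getD 0 : Nat) + 1) 10
          + PySem.Int.mod (((PySem.List.index? pvAlphabet c).getD 0 : Nat) + 1) 10) a =
    a + l.foldl (fun acc c =>
      acc + PySem.Int.floordiv (((PySem.List.index? pvAlphabet c).getD 0 : Nat) + 1) 10
          + PySem.Int.mod (((PySem.List.index? pvAlphabet c).getD 0 : Nat) + 1) 10) 0 := by
  induction l generalizing a with
  | nil => simp
  | cons c l ih =>
    simp only [List.foldl_cons]
    rw [ih, ih (0 + _ + _)]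
    ring

theorem pvTotal_eq (l : List Char) :
    pvDsum (PySem.Chars.join [] (l.map (fun c =>
      PySem.Int.toChars (((PySem.List.index? pvAlphabet c).getD 0 : Nat) + 1)))) =
    l.foldl (fun acc c =>
      acc + PySem.Int.floordiv (((PySem.List.index? pvAlphabet c).getD 0 : Nat) + 1) 10
          + PySem.Int.mod (((PySem.List.index? pvAlphabet c).getD 0 : Nat) + 1) 10) 0 := by
  have join_nil_cons : ∀ (p : List Char) (ps : List (List Char)),
      PySem.Chars.join [] (p :: ps) = p ++ PySem.Chars.join [] ps := by
    intro p ps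
    cases ps with
    | nil => rw [PySem.Chars.join_singleton, PySem.Chars.join_nil, List.append_nil]
    | cons q rest => rw [PySem.Chars.join_cons_cons]; simp
  induction l with
  | nil => rw [List.map_nil, PySem.Chars.join_nil]; rfl
  | cons c l ih =>
    rw [List.map_cons, join_nil_cons, pvDsum_append, pvChunk_eq c, ih]
    conv_rhs => rw [List.foldl_cons, pvB_shift]
    ring

theorem pvF_nonneg (c : Char) :
    0 ≤ PySem.Int.floordiv (((PySem.List.index? pvAlphabet c).getD 0 : Nat) + 1) 10
      + PySem.Int.mod (((PySem.List.index? pvAlphabet c).getD 0 : Nat) + 1) 10 := by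
  rw [← pvChunk_eq c, pvDsum_toChars _ (by positivity)]
  exact pvS_nonneg _

theorem pvTotal_nonneg (l : List Char) :
    0 ≤ l.foldl (fun acc c =>
      acc + PySem.Int.floordiv (((PySem.List.index? pvAlphabet c).getD 0 : Nat) + 1) 10
          + PySem.Int.mod (((PySem.List.index? pvAlphabet c).getD 0 : Nat) + 1) 10) 0 := by
  induction l with
  | nil => simp
  | cons c l ih =>
    rw [List.foldl_cons, pvB_shift]
    have := pvF_nonneg c
    linarith

-- ===== VERDICT (by name: the statement is the Claim_ definition above) =====
theorem word_weight_spec : Claim_equal_word_weight := by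
  intro s n _dom _pre
  show word_weight s n = word_weight_alt s n
  have hA : word_weight s n = (pvStepA^[(PySem.List.pyRange 0 n 1).length]
      (0, PySem.Chars.join [] (s.toList.map (fun c =>
        PySem.Int.toChars (((PySem.List.index? pvAlphabet c).getD 0 : Nat) + 1))))).1 :=
    congrArg Prod.fst (foldl_const_iterate _ pvStepA _)
  rw [hA, PySem.List.length_pyRange_one]
  by_cases hn : n ≤ 0
  · have h0 : (n - 0).toNat = 0 := by omega
    rw [h0]
    show (0 : Int) = word_weight_alt s n
    rw [word_weight_alt, if_pos hn]
  · have hk : (n - 0).toNat = (n - 1).toNat + 1 := by omega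
    rw [hk, pvStepA_iterate, word_weight_alt, if_neg hn]
    show _ = pvReduce (n - 1).toNat (s.toList.foldl (fun acc c =>
      acc + PySem.Int.floordiv (((PySem.List.index? pvAlphabet c).getD 0 : Nat) + 1) 10
          + PySem.Int.mod (((PySem.List.index? pvAlphabet c).getD 0 : Nat) + 1) 10) 0)
    rw [pvTotal_eq s.toList]
    exact (pvReduce_eq_iterate _ _ (pvTotal_nonneg s.toList)).symm
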